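-- pv_equiv track=rewrite | github.com/MerijnF/advent-of-code-python | 2024/day07/part1.py | operate_to
-- ===== SOURCE A (Python) =====
-- def operate_to(result: int, values: list[int]) -> bool:
--     a = values[0]
--     b = values[1]
--
--     sum = a + b
--     mul = a * b
--
--     if len(values) == 2:
--         return (sum == result) or (mul == result)
--
--     sum_found = operate_to(result, [sum] + values[2:])
--     mul_found = operate_to(result, [mul] + values[2:])
--
--     return sum_found or mul_found
-- ===== SOURCE B (Python) =====
-- def operate_to(result: int, values: list[int]) -> bool:
--     a = values[0]
--     b = values[1]
--     reachable = {a + b, a * b}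
--     for v in values[2:]:
--         reachable = {x + v for x in reachable} | {x * v for x in reachable}
--     return result in reachable
-- ===== Notes on version B (the rewrite author's own statement) =====
-- stated objective: alternative
-- what changed: Replaced A's recursive binary tree over [sum/mul]+rest lists with a single iterative pass maintaining a set of reachable partial results, which deduplicates equal intermediate values.
import Mathlib
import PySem

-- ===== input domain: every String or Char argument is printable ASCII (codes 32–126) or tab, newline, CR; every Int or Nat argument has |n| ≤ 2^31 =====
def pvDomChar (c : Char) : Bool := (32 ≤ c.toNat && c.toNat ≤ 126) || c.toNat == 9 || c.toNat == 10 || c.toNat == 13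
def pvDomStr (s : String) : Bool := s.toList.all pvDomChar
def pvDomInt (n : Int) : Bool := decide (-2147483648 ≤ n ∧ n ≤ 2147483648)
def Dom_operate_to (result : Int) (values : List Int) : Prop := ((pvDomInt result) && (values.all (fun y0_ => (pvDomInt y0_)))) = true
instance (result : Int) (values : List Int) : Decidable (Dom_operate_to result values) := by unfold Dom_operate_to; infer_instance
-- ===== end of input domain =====

-- B replaces A's recursive sum/mul tree by one iterative pass over the tail maintaining a
-- set of reachable partial results (objective: alternative algorithm, same results).

-- ===== PORT A =====
-- literal transliteration of A's recursion; the `_ => false` arm covers only lists of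
-- length < 2, where Python raises IndexError (excluded by Pre_)
def operate_to (result : Int) (values : List Int) : Bool :=
  match values with
  | a :: b :: rest =>
    let sum := a + b
    let mul := a * b
    if rest.isEmpty then (sum == result) || (mul == result)
    else operate_to result (sum :: rest) || operate_to result (mul :: rest)
  | _ => false
termination_by values.length
decreasing_by all_goals simp_all

-- ===== PORT B =====
-- one loop step: reachable = {x+v for x in reachable} | {x*v for x in reachable}
def stepReach (s : PySem.Set Int) (v : Int) : PySem.Set Int :=
  PySem.Set.union (PySem.Set.ofList (s.map (fun x => x + v))) (s.map (fun x => x * v))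

def operate_to_alt (result : Int) (values : List Int) : Bool :=
  match values with
  | [] => false          -- values[0] raises IndexError (outside Pre_)
  | [_] => false         -- values[1] raises IndexError (outside Pre_)
  | a :: b :: rest =>
    let reachable := rest.foldl stepReach (PySem.Set.ofList [a + b, a * b])
    PySem.Set.contains reachable result

-- ===== PRECONDITION & SPEC =====
-- Python A indexes values[0] and values[1]: lists of length < 2 raise IndexError
def Pre_operate_to (result : Int) (values : List Int) : Prop := 2 ≤ values.length
instance (result : Int) (values : List Int) : Decidable (Pre_operate_to result values) := by unfold Pre_operate_to; infer_instance
def pvWitness_operate_to : Int × List Int := (5, [2, 3])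

def Spec_operate_to (result : Int) (values : List Int) (out : Bool) : Prop := out = operate_to_alt result values
instance (result : Int) (values : List Int) (out : Bool) : Decidable (Spec_operate_to result values out) := by unfold Spec_operate_to; infer_instance

-- ===== CLAIM (what is proved, stated in full; the proofs are below) =====
def Claim_equal_operate_to : Prop := ∀ (result : Int) (values : List Int), Dom_operate_to result values → Pre_operate_to result values → Spec_operate_to result values (operate_to result values)

-- ===== LEMMAS AND PROOFS =====

-- proof-side characterisation: can x be extended along rs by +/× to hit r?
def chk (r x : Int) : List Int → Bool
  | [] => x == r
  | v :: rs => chk r (x + v) rs || chk r (x * v) rs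

theorem operate_to_eq_chk (r : Int) (rest : List Int) :
    ∀ a b : Int, operate_to r (a :: b :: rest) = (chk r (a + b) rest || chk r (a * b) rest) := by
  induction rest with
  | nil => intro a b; simp [operate_to, chk]
  | cons v rs ih =>
    intro a b
    rw [operate_to]
    simp only [List.isEmpty_cons, if_false, Bool.false_eq_true]
    rw [ih, ih, chk, chk]

theorem mem_stepReach (x : Int) (s : PySem.Set Int) (v : Int) :
    x ∈ stepReach s v ↔ ∃ y ∈ s, x = y + v ∨ x = y * v := by
  simp only [stepReach, PySem.Set.mem_union, PySem.Set.mem_ofList, List.mem_map]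
  constructor
  · rintro (⟨y, hy, rfl⟩ | ⟨y, hy, rfl⟩) <;> exact ⟨y, hy, by simp⟩
  · rintro ⟨y, hy, rfl | rfl⟩
    · exact Or.inl ⟨y, hy, rfl⟩
    · exact Or.inr ⟨y, hy, rfl⟩

theorem foldl_reach (r : Int) (rest : List Int) :
    ∀ S : PySem.Set Int, (r ∈ rest.foldl stepReach S) ↔ ∃ x ∈ S, chk r x rest = true := by
  induction rest with
  | nil =>
    intro S
    simp only [List.foldl_nil, chk]
    constructor
    · intro h; exact ⟨r, h, by simp⟩
    · rintro ⟨x, hx, h⟩; simp only [beq_iff_eq] at h; exact h ▸ hx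
  | cons v rs ih =>
    intro S
    rw [List.foldl_cons, ih]
    constructor
    · rintro ⟨x, hx, hchk⟩
      obtain ⟨y, hy, rfl | rfl⟩ := (mem_stepReach x S v).1 hx <;>
        exact ⟨y, hy, by simp [chk, hchk]⟩
    · rintro ⟨y, hy, hchk⟩
      rw [chk, Bool.or_eq_true] at hchk
      rcases hchk with h | h
      · exact ⟨y + v, (mem_stepReach _ S v).2 ⟨y, hy, Or.inl rfl⟩, h⟩
      · exact ⟨y * v, (mem_stepReach _ S v).2 ⟨y, hy, Or.inr rfl⟩, h⟩

-- ===== VERDICT (by name: the statement is the Claim_ definition above) =====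
theorem operate_to_spec : Claim_equal_operate_to := by
  intro r values _ _
  match values with
  | a :: b :: rest =>
    unfold Spec_operate_to
    rw [operate_to_eq_chk, operate_to_alt]
    rw [Bool.eq_iff_iff, Bool.or_eq_true, PySem.Set.contains_iff, foldl_reach]
    constructor
    · rintro (h | h)
      · exact ⟨a + b, by simp [PySem.Set.mem_ofList], h⟩
      · exact ⟨a * b, by simp [PySem.Set.mem_ofList], h⟩
    · rintro ⟨x, hx, h⟩
      rw [PySem.Set.mem_ofList] at hx
      simp only [List.mem_cons, List.not_mem_nil, or_false] at hx
      rcases hx with rfl | rfl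
      · exact Or.inl h
      · exact Or.inr h
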